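-- pv_equiv track=rewrite | github.com/volcengine/veScale | vescale/pipe/pipe_stage.py | _get_stage_to_chunk_mapping
-- ===== SOURCE A (Python) =====
-- def _get_stage_to_chunk_mapping(num_model_chunks, num_stages):
--     """
--     Gets a mapping from stage id to model partition ids.
--
--     Args:
--         num_model_chunks (int): number of virtual pipeline chunks per stage.
--         num_stages (int): number of pipeline stages.
--
--     Returns:
--         Mapping from stages to their model chunks.
--
--     """
--     if num_model_chunks == 1:
--         stage_to_chunk = {i: [i] for i in range(num_stages)}
--     else:
--         length = num_stages * num_model_chunks
--         stage_to_chunk = {i: [] for i in range(num_stages)}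
--         for i in range(length):
--             stage_to_chunk[i % num_stages].append(i)
--     return stage_to_chunk
-- ===== SOURCE B (Python) =====
-- def _get_stage_to_chunk_mapping(num_model_chunks, num_stages):
--     """Each stage s owns exactly the chunk ids s, s+num_stages, s+2*num_stages, ...
--     so build each stage's list directly as a strided range (no special case,
--     no modulo-scatter pass)."""
--     stop = num_stages * num_model_chunks
--     return {s: list(range(s, stop, num_stages)) for s in range(num_stages)}
-- ===== Notes on version B (the rewrite author's own statement) =====
-- stated objective: idiomatic
-- what changed: Dropped the num_model_chunks==1 special case and the modulo-scatter loop over all num_stages*num_model_chunks indices; B builds each stage's chunk list directly as the strided arithmetic sequence range(s, num_stages*num_model_chunks, num_stages) in one dict comprehension.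
-- crash fix: When num_model_chunks < 0 and num_stages < 0, A raises KeyError (the scatter loop runs over a positive product but the bucket dict is empty); B returns the empty dict {} there. — e.g. on _get_stage_to_chunk_mapping(-1, -1): A raises KeyError, B returns []
import Mathlib
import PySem

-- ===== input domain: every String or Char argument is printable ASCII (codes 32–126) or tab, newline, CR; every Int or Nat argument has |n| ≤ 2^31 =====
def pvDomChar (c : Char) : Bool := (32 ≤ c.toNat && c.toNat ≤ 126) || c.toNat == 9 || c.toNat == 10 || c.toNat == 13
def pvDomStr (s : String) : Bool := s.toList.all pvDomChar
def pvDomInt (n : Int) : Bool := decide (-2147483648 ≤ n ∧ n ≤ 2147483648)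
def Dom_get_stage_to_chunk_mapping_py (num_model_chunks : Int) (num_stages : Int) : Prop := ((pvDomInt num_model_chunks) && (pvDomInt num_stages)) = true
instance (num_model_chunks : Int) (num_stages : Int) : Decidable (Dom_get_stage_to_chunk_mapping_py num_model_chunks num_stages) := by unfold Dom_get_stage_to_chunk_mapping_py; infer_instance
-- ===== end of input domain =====

-- B replaces A's chunk==1 special case and modulo-scatter loop by one comprehension
-- mapping each stage s to the strided range(s, num_stages*num_model_chunks, num_stages) (idiomatic).


-- ===== PORT A =====
def get_stage_to_chunk_mapping_py (num_model_chunks : Int) (num_stages : Int) : List (Int × List Int) :=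
  if num_model_chunks = 1 then
    ((PySem.List.pyRange 0 num_stages 1).foldl
      (fun d i => d.insert i [i]) (PySem.Dict.empty : PySem.Dict Int (List Int))).items
  else
    let length := num_stages * num_model_chunks
    let d0 : PySem.Dict Int (List Int) :=
      (PySem.List.pyRange 0 num_stages 1).foldl (fun d i => d.insert i []) PySem.Dict.empty
    -- stage_to_chunk[i % num_stages].append(i): exact under Pre_ (the key is always present,
    -- so Dict.modify's default is never used)
    ((PySem.List.pyRange 0 length 1).foldl
      (fun d i => d.modify (PySem.Int.mod i num_stages) [] (fun l => l ++ [i])) d0).items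

-- ===== PORT B =====
def get_stage_to_chunk_mapping_py_alt (num_model_chunks : Int) (num_stages : Int) : List (Int × List Int) :=
  let stop := num_stages * num_model_chunks
  (PySem.List.pyRange 0 num_stages 1).map
    (fun s => (s, PySem.List.pyRange s stop num_stages))

-- ===== PRECONDITION & SPEC =====
-- Pre_ excludes exactly the inputs where A raises KeyError: num_model_chunks < 0 and
-- num_stages < 0 (the scatter loop runs over a positive product into an empty bucket dict).
def Pre_get_stage_to_chunk_mapping_py (num_model_chunks : Int) (num_stages : Int) : Prop :=
  ¬ (num_model_chunks < 0 ∧ num_stages < 0)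
instance (num_model_chunks : Int) (num_stages : Int) : Decidable (Pre_get_stage_to_chunk_mapping_py num_model_chunks num_stages) := by unfold Pre_get_stage_to_chunk_mapping_py; infer_instance
def pvWitness_get_stage_to_chunk_mapping_py : Int × Int := (2, 3)

-- When num_model_chunks < 0 and num_stages < 0, A raises KeyError; B returns the empty dict.
def Raises_get_stage_to_chunk_mapping_py (num_model_chunks : Int) (num_stages : Int) : Prop :=
  num_model_chunks < 0 ∧ num_stages < 0
instance (num_model_chunks : Int) (num_stages : Int) : Decidable (Raises_get_stage_to_chunk_mapping_py num_model_chunks num_stages) := by unfold Raises_get_stage_to_chunk_mapping_py; infer_instance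
def pvRaiseWitness_get_stage_to_chunk_mapping_py : Int × Int := (-1, -1)
def pvRaiseWitnessOut_get_stage_to_chunk_mapping_py : List (Int × List Int) := []

def Spec_get_stage_to_chunk_mapping_py (num_model_chunks : Int) (num_stages : Int) (out : List (Int × List Int)) : Prop := out = get_stage_to_chunk_mapping_py_alt num_model_chunks num_stages
instance (num_model_chunks : Int) (num_stages : Int) (out : List (Int × List Int)) : Decidable (Spec_get_stage_to_chunk_mapping_py num_model_chunks num_stages out) := by unfold Spec_get_stage_to_chunk_mapping_py; infer_instance

-- ===== CLAIM (what is proved, stated in full; the proofs are below) =====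
def Claim_equal_get_stage_to_chunk_mapping_py : Prop := ∀ (num_model_chunks : Int) (num_stages : Int), Dom_get_stage_to_chunk_mapping_py num_model_chunks num_stages → Pre_get_stage_to_chunk_mapping_py num_model_chunks num_stages → Spec_get_stage_to_chunk_mapping_py num_model_chunks num_stages (get_stage_to_chunk_mapping_py num_model_chunks num_stages)
def Claim_raises_get_stage_to_chunk_mapping_py : Prop := (∀ (num_model_chunks : Int) (num_stages : Int), Dom_get_stage_to_chunk_mapping_py num_model_chunks num_stages → Raises_get_stage_to_chunk_mapping_py num_model_chunks num_stages → ¬ Pre_get_stage_to_chunk_mapping_py num_model_chunks num_stages) ∧ (Dom_get_stage_to_chunk_mapping_py (pvRaiseWitness_get_stage_to_chunk_mapping_py.1) (pvRaiseWitness_get_stage_to_chunk_mapping_py.2) ∧ Raises_get_stage_to_chunk_mapping_py (pvRaiseWitness_get_stage_to_chunk_mapping_py.1) (pvRaiseWitness_get_stage_to_chunk_mapping_py.2) ∧ get_stage_to_chunk_mapping_py_alt (pvRaiseWitness_get_stage_to_chunk_mapping_py.1) (pvRaiseWitness_get_stage_to_chunk_mapping_py.2) = pvRaiseWitnessOut_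get_stage_to_chunk_mapping_py)

-- ===== LEMMAS AND PROOFS =====

-- two strictly increasing integer lists with the same members are equal
theorem pvEqOfPairwiseLtMem {l₁ l₂ : List Int}
    (h₁ : List.Pairwise (· < ·) l₁) (h₂ : List.Pairwise (· < ·) l₂)
    (h : ∀ x, x ∈ l₁ ↔ x ∈ l₂) : l₁ = l₂ := by
  apply List.Perm.eq_of_pairwise (le := (· < ·))
    (fun a b _ _ hab hba => absurd hba (lt_asymm hab)) h₁ h₂
  exact (List.perm_ext_iff_of_nodup h₁.nodup h₂.nodup).2 h

theorem pvFmodPos (i ns : Int) (h : 0 < ns) : PySem.Int.mod i ns = i % ns := by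
  simp [PySem.Int.mod, Int.fmod_eq_emod, if_pos (Or.inl h.le)]

theorem pvPairwiseLtPyRangePos (a b : Int) {s : Int} (h : 0 < s) :
    List.Pairwise (· < ·) (PySem.List.pyRange a b s) := by
  rw [PySem.List.pyRange_of_pos a b h]
  exact (List.pairwise_lt_range).map _
    (fun _ _ hk => by have hcast : ((_ : Nat) : Int) < _ := Int.ofNat_lt.mpr hk; nlinarith [hcast])

theorem pvFilterMod (ns k L : Int) (hns : 0 < ns) (hk0 : 0 ≤ k) (hk : k < ns) :
    (PySem.List.pyRange 0 L 1).filter (fun i => PySem.Int.mod i ns == k)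
      = PySem.List.pyRange k L ns := by
  apply pvEqOfPairwiseLtMem
  · exact (PySem.List.pairwise_lt_pyRange_one 0 L).filter _
  · exact pvPairwiseLtPyRangePos k L hns
  · intro x
    rw [List.mem_filter, PySem.List.mem_pyRange_one, PySem.List.mem_pyRange_iff_of_pos hns,
      pvFmodPos x ns hns, beq_iff_eq]
    constructor
    · rintro ⟨⟨h0, hL⟩, hm⟩
      have hdvd : ns ∣ x - k := ⟨x / ns, by rw [← hm]; rw [Int.emod_def]; ring⟩
      refine ⟨?_, hL, hdvd⟩
      obtain ⟨c, hc⟩ := hdvd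
      rcases le_or_gt 0 c with hc0 | hc0
      · nlinarith
      · exfalso; nlinarith [Int.mul_le_mul_of_nonneg_left (by omega : c ≤ -1) hns.le]
    · rintro ⟨hkx, hL, c, hc⟩
      have hx : x = k + ns * c := by linarith
      refine ⟨⟨by linarith, hL⟩, ?_⟩
      rw [hx, Int.add_mul_emod_self_left, Int.emod_eq_of_lt hk0 hk]

theorem pvPyRangeSelfSingleton {s ns : Int} (h0 : 0 ≤ s) (h : s < ns) :
    PySem.List.pyRange s ns ns = [s] := by
  have hns : 0 < ns := by omega
  apply pvEqOfPairwiseLtMem (pvPairwiseLtPyRangePos s ns hns) (by simp)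
  intro x
  rw [PySem.List.mem_pyRange_iff_of_pos hns, List.mem_singleton]
  constructor
  · rintro ⟨hsx, hxn, c, hc⟩
    have hcz : c = 0 := by
      rcases lt_trichotomy c 0 with hc0 | hc0 | hc0
      · exfalso; nlinarith
      · exact hc0
      · exfalso; nlinarith
    subst hcz
    simp only [mul_zero] at hc
    omega
  · rintro rfl; exact ⟨le_refl _, h, 0, by ring⟩

theorem pvSetUpdateId (s : PySem.Set Int) (xs : List Int)
    (h : ∀ x ∈ xs, s.contains x = true) : PySem.Set.update s xs = s := by
  induction xs with
  | nil => rfl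
  | cons x xs ih =>
    have hx : PySem.Set.add s x = s := by
      have hm : x ∈ s := by simpa using h x List.mem_cons_self
      simp [PySem.Set.add, hm]
    show PySem.Set.update (PySem.Set.add s x) xs = s
    rw [hx]; exact ih (fun y hy => h y (List.mem_cons_of_mem _ hy))

-- the bucket-initialising dict {i: [] for i in range(ns)}
theorem pvD0Items (ns : Int) :
    ((PySem.List.pyRange 0 ns 1).foldl
      (fun d i => d.insert i ([] : List Int)) PySem.Dict.empty).items
      = (PySem.List.pyRange 0 ns 1).map (fun i => (i, ([] : List Int))) := by
  have := PySem.Dict.items_foldl_insert_fresh (PySem.List.pyRange 0 ns 1)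
    (fun i => i) (fun _ => ([] : List Int)) PySem.Dict.empty
    (fun _ _ => PySem.Dict.contains_empty _)
    (by simpa using PySem.List.nodup_pyRange_one 0 ns)
  simpa using this

theorem pvD0GetD (ns k : Int) :
    ((PySem.List.pyRange 0 ns 1).foldl
      (fun d i => d.insert i ([] : List Int)) PySem.Dict.empty).getD k [] = [] := by
  set d := (PySem.List.pyRange 0 ns 1).foldl
      (fun d i => d.insert i ([] : List Int)) PySem.Dict.empty with hd
  cases hg : d.get? k with
  | none => simp [PySem.Dict.getD, hg]
  | some v =>
    have hmem := PySem.Dict.mem_items_of_get?_eq_some _ hg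
    rw [hd, pvD0Items] at hmem
    simp only [List.mem_map] at hmem
    obtain ⟨i, _, hi⟩ := hmem
    have : v = [] := by cases hi; rfl
    simp [PySem.Dict.getD, hg, this]

theorem pvD0Keys (ns : Int) :
    ((PySem.List.pyRange 0 ns 1).foldl
      (fun d i => d.insert i ([] : List Int)) PySem.Dict.empty).keys
      = PySem.List.pyRange 0 ns 1 := by
  show (((PySem.List.pyRange 0 ns 1).foldl
      (fun d i => d.insert i ([] : List Int)) PySem.Dict.empty).items).map (·.1)
      = PySem.List.pyRange 0 ns 1
  rw [pvD0Items]; simp [Function.comp_def]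

-- ===== VERDICT (by name: the statement is the Claim_ definition above) =====
theorem get_stage_to_chunk_mapping_py_spec : Claim_equal_get_stage_to_chunk_mapping_py := by
  intro nmc ns _ hpre
  unfold Spec_get_stage_to_chunk_mapping_py
  unfold get_stage_to_chunk_mapping_py get_stage_to_chunk_mapping_py_alt
  rcases le_or_gt ns 0 with hns | hns
  · -- no stages: both sides are the empty dict
    have hr : PySem.List.pyRange 0 ns 1 = [] := PySem.List.pyRange_one_eq_nil hns
    have hL : ns * nmc ≤ 0 := by
      rcases lt_or_eq_of_le hns with h | h
      · have : 0 ≤ nmc := by by_contra hc; exact hpre ⟨by omega, h⟩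
        exact mul_nonpos_of_nonpos_of_nonneg hns this
      · rw [h, zero_mul]
    split
    · simp only [hr, List.foldl_nil]; rfl
    · simp only [hr, List.foldl_nil, PySem.List.pyRange_one_eq_nil hL, List.map_nil]
      rfl
  · split
    · -- num_model_chunks == 1 branch
      rename_i h1
      subst h1
      have hit := PySem.Dict.items_foldl_insert_fresh (PySem.List.pyRange 0 ns 1)
        (fun i => i) (fun i => [i]) PySem.Dict.empty
        (fun _ _ => PySem.Dict.contains_empty _)
        (by simpa using PySem.List.nodup_pyRange_one 0 ns)
      rw [show (PySem.Dict.empty : PySem.Dict Int (List Int)).items = [] from rfl,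
        List.nil_append] at hit
      rw [hit]
      apply List.map_congr_left
      intro s hs
      rw [PySem.List.mem_pyRange_one] at hs
      rw [mul_one, pvPyRangeSelfSingleton hs.1 hs.2]
    · -- general scatter branch
      set L := ns * nmc with hLdef
      set d0 := (PySem.List.pyRange 0 ns 1).foldl
        (fun d i => d.insert i ([] : List Int)) PySem.Dict.empty with hd0
      set dfin := (PySem.List.pyRange 0 L 1).foldl
        (fun d i => d.modify (PySem.Int.mod i ns) [] (fun l => l ++ [i])) d0 with hdfin
      have hmodmem : ∀ i : Int, PySem.Int.mod i ns ∈ PySem.List.pyRange 0 ns 1 := by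
        intro i
        rw [pvFmodPos i ns hns, PySem.List.mem_pyRange_one]
        exact ⟨Int.emod_nonneg i (by omega), Int.emod_lt_of_pos i hns⟩
      have hd0keys : d0.keys = PySem.List.pyRange 0 ns 1 := pvD0Keys ns
      have hkeys : dfin.keys = PySem.List.pyRange 0 ns 1 := by
        have hk := PySem.Dict.keys_foldl_modify_key (PySem.List.pyRange 0 L 1)
          (fun i => PySem.Int.mod i ns) ([] : List Int) (fun _ i l => l ++ [i]) d0
        have hupd : PySem.Set.update d0.keys
            ((PySem.List.pyRange 0 L 1).map (fun i => PySem.Int.mod i ns)) = d0.keys := by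
          apply pvSetUpdateId
          intro x hx
          simp only [List.mem_map] at hx
          obtain ⟨i, _, rfl⟩ := hx
          rw [hd0keys]
          simpa [List.contains_iff_mem] using hmodmem i
        exact hk.trans (hupd.trans hd0keys)
      have hnodup : dfin.keys.Nodup := by rw [hkeys]; exact PySem.List.nodup_pyRange_one 0 ns
      rw [PySem.Dict.items_eq_map_keys dfin hnodup [], hkeys]
      apply List.map_congr_left
      intro s hs
      rw [PySem.List.mem_pyRange_one] at hs
      have hgd : dfin.getD s [] = PySem.List.pyRange s L ns := by
        have e : dfin = ((PySem.List.pyRange 0 L 1).map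
            (fun j => (PySem.Int.mod j ns, j))).foldl
            (fun d p => d.modify p.1 [] (fun l => l ++ [p.2])) d0 := by
          rw [hdfin]
          exact (List.foldl_map (f := fun j : Int => (PySem.Int.mod j ns, j))
            (g := fun (d : PySem.Dict Int (List Int)) (p : Int × Int) =>
              d.modify p.1 [] (fun l => l ++ [p.2]))
            (l := PySem.List.pyRange 0 L 1) (init := d0)).symm
        rw [e, PySem.Dict.getD_foldl_modify_append, hd0, pvD0GetD ns s, List.nil_append,
          List.filter_map, List.map_map]
        have hfm : ((PySem.List.pyRange 0 L 1).filter
            ((fun p : Int × Int => p.1 == s) ∘ (fun j => (PySem.Int.mod j ns, j)))).map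
            ((fun p : Int × Int => p.2) ∘ (fun j => (PySem.Int.mod j ns, j)))
            = (PySem.List.pyRange 0 L 1).filter (fun j => PySem.Int.mod j ns == s) := by
          simp [Function.comp_def]
        rw [hfm, pvFilterMod ns s L hns hs.1 hs.2]
      rw [hgd]

@[simp] theorem get_stage_to_chunk_mapping_py_raises : Claim_raises_get_stage_to_chunk_mapping_py := by
  unfold Claim_raises_get_stage_to_chunk_mapping_py
  constructor
  · intro nmc ns _ hr hpre
    exact hpre hr
  · refine ⟨by decide, by decide, by decide⟩
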